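-- pv_equiv track=rewrite | github.com/lowthg/latex2wp | math2html.py | parse_arg
-- ===== SOURCE A (Python) =====
-- def parse_arg(expr: str, i: int) -> (str, int):
--     """
--     get argument to command
--     """
--     depth = 0
--     result = ''
--     while expr[i] == ' ':
--         i += 1
--     while True:
--         x = expr[i]
--         i += 1
--         if x == '}':
--             depth -= 1
--         elif x == '{':
--             depth += 1
--         else:
--             result += x
--         if depth <= 0:
--             break
--     return result, i
-- ===== SOURCE B (Python) =====
-- def parse_arg(expr: str, i: int) -> (str, int):
--     """
--     get argument to command
--     """
--     while expr[i] == ' ':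
--         i += 1
--     start = i
--     depth = 0
--     while True:
--         x = expr[i]
--         i += 1
--         if x == '}':
--             depth -= 1
--         elif x == '{':
--             depth += 1
--         if depth <= 0:
--             break
--     arg = ''.join(c for c in expr[start:i] if c not in '{}')
--     return arg, i
-- ===== Notes on version B (the rewrite author's own statement) =====
-- stated objective: alternative
-- what changed: A accumulates the result character by character inside the scanning loop; B's loop tracks only the brace depth and the start index, and the argument is extracted afterwards in one bulk step as a slice of the input with braces filtered out.
-- outside the precondition, e.g. on parse_arg('{a}', -3): A returns ('a', 0), B returns ('', 0)
import Mathlib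
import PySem

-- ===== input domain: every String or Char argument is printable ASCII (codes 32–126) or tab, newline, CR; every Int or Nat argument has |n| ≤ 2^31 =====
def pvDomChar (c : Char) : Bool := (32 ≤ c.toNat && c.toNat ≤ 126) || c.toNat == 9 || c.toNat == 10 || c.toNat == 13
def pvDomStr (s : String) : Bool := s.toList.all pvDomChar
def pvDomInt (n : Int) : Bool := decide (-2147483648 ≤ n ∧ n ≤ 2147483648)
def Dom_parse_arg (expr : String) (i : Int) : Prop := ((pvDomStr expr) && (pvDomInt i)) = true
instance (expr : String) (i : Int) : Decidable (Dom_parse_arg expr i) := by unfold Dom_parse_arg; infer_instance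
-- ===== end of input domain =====

-- B defers extraction to a slice+filter after a depth-only scan; same return value on the stated domain.

-- ===== PORT A =====
-- `while expr[i] == ' ': i += 1` (fuel bounds the loop; spaces run out within the string)
def pvSkipSpacesA (cs : List Char) : Nat → Int → Int
  | 0, i => i
  | fuel + 1, i =>
    match PySem.List.pyGet? cs i with
    | some ' ' => pvSkipSpacesA cs fuel (i + 1)
    | _ => i

-- the `while True` loop of A, accumulating `result` character by character
def pvScanA (cs : List Char) : Nat → Int → Int → List Char → List Char × Int
  | 0, i, _, result => (result, i)
  | fuel + 1, i, depth, result =>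
    match PySem.List.pyGet? cs i with
    | none => (result, i)  -- IndexError in Python; excluded by Pre_
    | some x =>
      let i' := i + 1
      if x = '}' then
        if depth - 1 ≤ 0 then (result, i') else pvScanA cs fuel i' (depth - 1) result
      else if x = '{' then
        if depth + 1 ≤ 0 then (result, i') else pvScanA cs fuel i' (depth + 1) result
      else
        if depth ≤ 0 then (result ++ [x], i') else pvScanA cs fuel i' depth (result ++ [x])

def parse_arg (expr : String) (i : Int) : String × Int :=
  match pvScanA expr.toList (expr.toList.length + 1)
      (pvSkipSpacesA expr.toList (expr.toList.length + 1) i) 0 [] with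
  | (result, k) => (String.ofList result, k)

-- ===== PORT B =====
-- B's identical leading-space loop
def pvSkipSpacesB (cs : List Char) : Nat → Int → Int
  | 0, i => i
  | fuel + 1, i =>
    match PySem.List.pyGet? cs i with
    | some ' ' => pvSkipSpacesB cs fuel (i + 1)
    | _ => i

-- B's depth-only scan: returns only the final index
def pvScanB (cs : List Char) : Nat → Int → Int → Int
  | 0, i, _ => i
  | fuel + 1, i, depth =>
    match PySem.List.pyGet? cs i with
    | none => i  -- IndexError in Python; excluded by Pre_
    | some x =>
      let depth' := if x = '}' then depth - 1 else if x = '{' then depth + 1 else depth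
      if depth' ≤ 0 then i + 1 else pvScanB cs fuel (i + 1) depth'

def parse_arg_alt (expr : String) (i : Int) : String × Int :=
  match pvSkipSpacesB expr.toList (expr.toList.length + 1) i with
  | start =>
    match pvScanB expr.toList (expr.toList.length + 1) start 0 with
    | k => (String.ofList ((PySem.List.slice expr.toList (some start) (some k)).filter
        (fun c => !(c = '{' ∨ c = '}'))), k)

-- ===== PRECONDITION & SPEC =====
-- Pre_ excludes inputs where A raises an IndexError (either loop runs off the end of the string),
-- and negative-i inputs whose scan would touch index 0 or beyond, where A's value is an artefact of
-- Python's negative-index wraparound restarting the scan at the string head (outside the natural domain).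
def Pre_parse_arg (expr : String) (i : Int) : Prop :=
  (0 ≤ i ∧
    (∃ j < expr.toList.length, i ≤ (j : Int) ∧
      (∀ m < j, i ≤ (m : Int) → expr.toList[m]! = ' ') ∧
      expr.toList[j]! ≠ ' ' ∧
      (∃ k ≤ expr.toList.length, j < k ∧
        ((expr.toList.take k).drop j).count '{' ≤ ((expr.toList.take k).drop j).count '}')))
  ∨ (-(expr.toList.length : Int) ≤ i ∧ i < 0 ∧
    (∃ j < expr.toList.length - 1, i + expr.toList.length ≤ (j : Int) ∧
      (∀ m < j, i + expr.toList.length ≤ (m : Int) → expr.toList[m]! = ' ') ∧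
      expr.toList[j]! ≠ ' ' ∧ expr.toList[j]! ≠ '{'))
instance (expr : String) (i : Int) : Decidable (Pre_parse_arg expr i) := by
  unfold Pre_parse_arg; infer_instance

def pvWitness_parse_arg : String × Int := (" {foo{bar}} rest", 0)

def Spec_parse_arg (expr : String) (i : Int) (out : String × Int) : Prop := out = parse_arg_alt expr i
instance (expr : String) (i : Int) (out : String × Int) : Decidable (Spec_parse_arg expr i out) := by unfold Spec_parse_arg; infer_instance

-- ===== CLAIM (what is proved, stated in full; the proofs are below) =====
def Claim_equal_parse_arg : Prop := ∀ (expr : String) (i : Int), Dom_parse_arg expr i → Pre_parse_arg expr i → Spec_parse_arg expr i (parse_arg expr i)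

-- ===== LEMMAS AND PROOFS =====

theorem pvSkip_eq (cs : List Char) (fuel : Nat) (i : Int) :
    pvSkipSpacesB cs fuel i = pvSkipSpacesA cs fuel i := by
  induction fuel generalizing i with
  | zero => rfl
  | succ n ih =>
    simp only [pvSkipSpacesA, pvSkipSpacesB]
    cases h : PySem.List.pyGet? cs i with
    | none => rfl
    | some c =>
      by_cases hc : c = ' ' <;> simp [hc, ih]

theorem pvSkip_le (cs : List Char) (fuel : Nat) (i : Int) :
    i ≤ pvSkipSpacesA cs fuel i := by
  induction fuel generalizing i with
  | zero => simp [pvSkipSpacesA]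
  | succ n ih =>
    simp only [pvSkipSpacesA]
    cases h : PySem.List.pyGet? cs i with
    | none => simp
    | some c =>
      by_cases hc : c = ' '
      · subst hc; simp only []
        exact le_trans (by omega) (ih (i + 1))
      · cases c
        simp_all

-- slice decomposition: under a valid read at a nonnegative index, the slice peels its head
theorem slice_cons_of_pyGet (cs : List Char) (i b : Int) (x : Char)
    (hi : 0 ≤ i) (hb : i + 1 ≤ b) (hx : PySem.List.pyGet? cs i = some x) :
    PySem.List.slice cs (some i) (some b) = x :: PySem.List.slice cs (some (i + 1)) (some b) := by
  have hlt : i < (cs.length : Int) := by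
    by_contra h
    rw [(PySem.List.pyGet?_eq_none_iff _ _).2 (by simp [PySem.Raise.InRange]; omega)] at hx
    simp at hx
  have hget : cs[i.toNat]? = some x := by
    rw [PySem.List.pyGet?_of_nonneg cs hi] at hx; exact hx
  have hlen : i.toNat < cs.length := by omega
  rw [PySem.List.slice_toNat cs hi (by omega), PySem.List.slice_toNat cs (by omega) (by omega)]
  have hdrop : cs.drop i.toNat = x :: cs.drop (i + 1).toNat := by
    have h1 : (i + 1).toNat = i.toNat + 1 := by omega
    rw [h1, ← List.getElem_cons_drop hlen]
    simp [List.getElem?_eq_getElem hlen] at hget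
    rw [hget]
  rw [hdrop]
  have h2 : b.toNat - i.toNat = (b.toNat - (i + 1).toNat) + 1 := by omega
  rw [h2, List.take_succ_cons]

theorem slice_self (cs : List Char) (i : Int) :
    PySem.List.slice cs (some i) (some i) = [] := by
  have h := PySem.List.length_slice cs i i
  have : (PySem.List.slice cs (some i) (some i)).length = 0 := by omega
  exact List.eq_nil_of_length_eq_zero this

-- B's scan index never decreases
theorem pvScanB_le (cs : List Char) (fuel : Nat) (i depth : Int) :
    i ≤ pvScanB cs fuel i depth := by
  induction fuel generalizing i depth with
  | zero => simp [pvScanB]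
  | succ n ih =>
    simp only [pvScanB]
    cases h : PySem.List.pyGet? cs i with
    | none => simp
    | some x =>
      dsimp only
      by_cases hc : (if x = '}' then depth - 1 else if x = '{' then depth + 1 else depth) ≤ 0
      · rw [if_pos hc]; omega
      · rw [if_neg hc]; exact le_trans (by omega) (ih (i + 1) _)

-- main invariant: A's accumulating scan equals B's depth-only scan plus slice extraction
theorem scan_invariant (cs : List Char) (fuel : Nat) :
    ∀ (i depth : Int) (result : List Char), 0 ≤ i →
    pvScanA cs fuel i depth result =
      (result ++ (PySem.List.slice cs (some i) (some (pvScanB cs fuel i depth))).filter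
        (fun c => !(c = '{' ∨ c = '}')),
       pvScanB cs fuel i depth) := by
  induction fuel with
  | zero => intro i depth result _; simp [pvScanA, pvScanB, slice_self]
  | succ n ih =>
    intro i depth result hi
    simp only [pvScanA, pvScanB]
    cases h : PySem.List.pyGet? cs i with
    | none => simp [slice_self]
    | some x =>
      dsimp only
      have hcons : ∀ b : Int, i + 1 ≤ b →
          PySem.List.slice cs (some i) (some b) = x :: PySem.List.slice cs (some (i + 1)) (some b) :=
        fun b hb => slice_cons_of_pyGet cs i b x hi hb h
      by_cases hx1 : x = '}'
      · subst hx1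
        simp only [reduceIte]
        by_cases hd : depth - 1 ≤ 0
        · rw [if_pos hd, if_pos hd, hcons (i + 1) (by omega), slice_self]
          simp
        · rw [if_neg hd, if_neg hd, ih (i + 1) (depth - 1) result (by omega),
              hcons _ (pvScanB_le cs n (i + 1) (depth - 1))]
          simp
      · by_cases hx2 : x = '{'
        · subst hx2
          simp only [if_neg hx1, reduceIte]
          by_cases hd : depth + 1 ≤ 0
          · rw [if_pos hd, if_pos hd, hcons (i + 1) (by omega), slice_self]
            simp
          · rw [if_neg hd, if_neg hd, ih (i + 1) (depth + 1) result (by omega),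
                hcons _ (pvScanB_le cs n (i + 1) (depth + 1))]
            simp
        · simp only [if_neg hx1, if_neg hx2]
          by_cases hd : depth ≤ 0
          · rw [if_pos hd, if_pos hd, hcons (i + 1) (by omega), slice_self]
            simp [hx1, hx2]
          · rw [if_neg hd, if_neg hd, ih (i + 1) depth (result ++ [x]) (by omega),
                hcons _ (pvScanB_le cs n (i + 1) depth)]
            simp [hx1, hx2]

-- the skip-space loop on an in-range negative index stops at the first non-space, still negative
theorem pvSkipNeg (cs : List Char) (fuel : Nat) (i : Int) (j : Nat)
    (hi0 : i < 0) (hin : -(cs.length : Int) ≤ i)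
    (hj : j < cs.length) (hij : i + cs.length ≤ (j : Int))
    (hsp : ∀ m : Nat, m < j → i + cs.length ≤ (m : Int) → cs[m]! = ' ')
    (hnsp : cs[j]! ≠ ' ')
    (hfuel : (j : Int) - cs.length - i < fuel) :
    pvSkipSpacesA cs fuel i = (j : Int) - cs.length := by
  induction fuel generalizing i with
  | zero => exfalso; omega
  | succ n ih =>
    have hget : PySem.List.pyGet? cs i = cs[cs.length - (-i).toNat]? :=
      PySem.List.pyGet?_neg cs hi0 hin
    have hidx : cs.length - (-i).toNat = (i + cs.length).toNat := by omega
    by_cases heq : i + (cs.length : Int) = (j : Int)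
    · have hjj : (i + (cs.length : Int)).toNat = j := by omega
      rw [hidx, hjj, List.getElem?_eq_getElem hj, ← getElem!_pos cs j hj] at hget
      simp only [pvSkipSpacesA, hget]
      have : ¬ cs[j]! = ' ' := hnsp
      split
      · simp_all
      · omega
    · have hmj : (i + (cs.length : Int)).toNat < j := by omega
      have hm : cs[(i + (cs.length : Int)).toNat]! = ' ' := hsp _ hmj (by omega)
      have hml : (i + (cs.length : Int)).toNat < cs.length := by omega
      rw [hidx, List.getElem?_eq_getElem hml, ← getElem!_pos cs _ hml, hm] at hget
      simp only [pvSkipSpacesA, hget]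
      exact ih (i + 1) (by omega) (by omega) (by omega)
        (fun m h1 h2 => hsp m h1 (by omega)) (by omega)

-- expr[t:t+1] is the one-character list at t, for an in-range negative t ≤ -2
theorem slice_singleton_neg (cs : List Char) (t : Int) (x : Char)
    (ht2 : t ≤ -2) (hx : PySem.List.pyGet? cs t = some x) :
    PySem.List.slice cs (some t) (some (t + 1)) = [x] := by
  have hlen : -(cs.length : Int) ≤ t := by
    by_contra hc
    rw [(PySem.List.pyGet?_eq_none_iff _ _).2 (by simp [PySem.Raise.InRange]; omega)] at hx
    simp at hx
  have hk1 : t = -(((-t).toNat : Nat) : Int) := by omega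
  have hk2 : t + 1 = -((((-t).toNat - 1 : Nat)) : Int) := by omega
  have h1 : PySem.List.clampIdx cs.length t = cs.length - (-t).toNat := by
    have h := PySem.List.clampIdx_neg_natCast cs.length (-t).toNat (by omega)
    rwa [← hk1] at h
  have h2 : PySem.List.clampIdx cs.length (t + 1) = cs.length - ((-t).toNat - 1) := by
    have h := PySem.List.clampIdx_neg_natCast cs.length ((-t).toNat - 1) (by omega)
    rwa [← hk2] at h
  have hxg : cs[cs.length - (-t).toNat]? = some x := by
    rw [← PySem.List.pyGet?_neg cs (by omega) hlen]; exact hx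
  have hl : cs.length - (-t).toNat < cs.length := by omega
  have hdrop : cs.drop (cs.length - (-t).toNat) =
      cs[cs.length - (-t).toNat] :: cs.drop (cs.length - (-t).toNat + 1) :=
    (List.getElem_cons_drop hl).symm
  have hxe : cs[cs.length - (-t).toNat] = x := by
    rw [List.getElem?_eq_getElem hl] at hxg; exact Option.some.inj hxg
  have harith : cs.length - ((-t).toNat - 1) - (cs.length - (-t).toNat) = 1 := by omega
  simp [PySem.List.slice, h1, h2, hdrop, hxe, harith]

-- ===== VERDICT =====
theorem parse_arg_spec : Claim_equal_parse_arg := by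
  intro expr i _hdom hpre
  unfold Spec_parse_arg parse_arg parse_arg_alt
  rw [pvSkip_eq]
  rcases hpre with ⟨hi, -⟩ | ⟨hin, hi0, j, hj, hij, hsp, hnsp, hnb⟩
  · have hj : 0 ≤ pvSkipSpacesA expr.toList (expr.toList.length + 1) i :=
      le_trans hi (pvSkip_le _ _ _)
    rw [scan_invariant _ _ _ _ _ hj]
    rfl
  · generalize hcs : expr.toList = cs at *
    have hjn : j < cs.length := by omega
    have hskip : pvSkipSpacesA cs (cs.length + 1) i = (j : Int) - cs.length :=
      pvSkipNeg cs _ i j hi0 hin hjn hij hsp hnsp (by omega)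
    rw [hskip]
    have hget : PySem.List.pyGet? cs ((j : Int) - cs.length) = some cs[j]! := by
      rw [PySem.List.pyGet?_neg cs (by omega) (by omega)]
      have hq : cs.length - (-((j : Int) - cs.length)).toNat = j := by omega
      rw [hq, List.getElem?_eq_getElem hjn, ← getElem!_pos cs j hjn]
    have hsl : PySem.List.slice cs (some ((j : Int) - cs.length))
        (some ((j : Int) - cs.length + 1)) = [cs[j]!] :=
      slice_singleton_neg _ _ _ (by omega) hget
    simp only [pvScanA, pvScanB, hget]
    generalize hx : cs[j]! = x at hsl hnb ⊢
    by_cases hb : x = '}'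
    · simp [hb, hsl]
    · simp [hb, hnb, hsl]
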